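-- pv_equiv track=rewrite | github.com/NickTrienens2025/localizationsVisualizer | services/enum_exporter.py | extract_substitution_parameters
-- ===== SOURCE A (Python) =====
-- def extract_substitution_parameters(value: str) -> str:
--     """Extract substitution parameters from a localized string in order of appearance"""
--     if not value:
--         return ""
--
--     parameters = []
--     i = 0
--
--     # Scan the string from left to right to preserve order
--     while i < len(value):
--         if value[i] == '%' and i + 1 < len(value):
--             next_char = value[i + 1]
--             if next_char == '@':
--                 parameters.append('String')
--                 i += 2  # Skip both % and @
--             elif next_char == 'd':
--                 parameters.append('Int')
--                 i += 2  # Skip both % and d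
--             else:
--                 i += 1
--         else:
--             i += 1
--
--     return ', '.join(parameters)
-- ===== SOURCE B (Python) =====
-- def extract_substitution_parameters(value: str) -> str:
--     """Extract substitution parameters from a localized string in order of appearance"""
--     parts = []
--     pending = False  # True iff the previous character opened an escape still to resolve
--     for c in value:
--         if pending and c == '@':
--             parts.append('String')
--             pending = False
--         elif pending and c == 'd':
--             parts.append('Int')
--             pending = False
--         else:
--             pending = (c == '%')
--     return ', '.join(parts)
-- ===== Notes on version B (the rewrite author's own statement) =====
-- stated objective: simpler
-- what changed: Replaced the index-arithmetic while-loop with character lookahead by a single for-loop state machine that carries one boolean pending-percent flag and does no indexing.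
import Mathlib
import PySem

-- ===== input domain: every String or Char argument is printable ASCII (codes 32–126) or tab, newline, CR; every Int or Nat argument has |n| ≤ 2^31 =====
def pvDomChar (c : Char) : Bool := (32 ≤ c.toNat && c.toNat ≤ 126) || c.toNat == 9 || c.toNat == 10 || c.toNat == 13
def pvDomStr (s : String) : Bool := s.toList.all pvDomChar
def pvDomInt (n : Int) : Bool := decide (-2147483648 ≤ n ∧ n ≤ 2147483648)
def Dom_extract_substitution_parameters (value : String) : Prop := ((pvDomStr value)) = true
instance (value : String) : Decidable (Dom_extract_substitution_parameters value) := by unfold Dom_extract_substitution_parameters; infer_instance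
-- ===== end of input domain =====

-- B replaces A's indexed lookahead while-loop by a one-boolean state machine over the chars (objective: simpler).

-- ===== PORT A =====
-- the while-loop of A: state is the index i and the accumulated parameter list
def pvAloop (cs : List Char) (i : Nat) (params : List String) : List String :=
  if h : i < cs.length then
    if cs[i] = '%' then
      if h2 : i + 1 < cs.length then
        if cs[i + 1] = '@' then pvAloop cs (i + 2) (params ++ ["String"])
        else if cs[i + 1] = 'd' then pvAloop cs (i + 2) (params ++ ["Int"])
        else pvAloop cs (i + 1) params
      else pvAloop cs (i + 1) params
    else pvAloop cs (i + 1) params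
  else params
termination_by cs.length - i

def extract_substitution_parameters (value : String) : String :=
  if value = "" then ""
  else PySem.Str.join ", " (pvAloop value.toList 0 [])

-- ===== PORT B =====
-- one step of B's for-loop: state is (pending-percent flag, accumulated parameter list)
def pvBstep (st : Bool × List String) (c : Char) : Bool × List String :=
  if st.1 && c == '@' then (false, st.2 ++ ["String"])
  else if st.1 && c == 'd' then (false, st.2 ++ ["Int"])
  else (c == '%', st.2)

def extract_substitution_parameters_alt (value : String) : String :=
  PySem.Str.join ", " (value.toList.foldl pvBstep (false, [])).2

-- ===== PRECONDITION & SPEC =====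
def Spec_extract_substitution_parameters (value : String) (out : String) : Prop := out = extract_substitution_parameters_alt value
instance (value : String) (out : String) : Decidable (Spec_extract_substitution_parameters value out) := by unfold Spec_extract_substitution_parameters; infer_instance

-- ===== CLAIM (what is proved, stated in full; the proofs are below) =====
def Claim_equal_extract_substitution_parameters : Prop := ∀ (value : String), Dom_extract_substitution_parameters value → Spec_extract_substitution_parameters value (extract_substitution_parameters value)

-- ===== LEMMAS AND PROOFS =====

-- proof-only characterisation of the extracted parameter list
def pvCollect (l : List Char) : List String :=
  match l with
  | [] => []
  | c :: rest =>
    if c = '%' then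
      match rest with
      | [] => []
      | c2 :: rest2 =>
        if c2 = '@' then "String" :: pvCollect rest2
        else if c2 = 'd' then "Int" :: pvCollect rest2
        else pvCollect (c2 :: rest2)
    else pvCollect rest
termination_by l.length

lemma pvCollect_nil : pvCollect [] = [] := by rw [pvCollect.eq_def]

lemma pvCollect_cons_ne (c : Char) (r : List Char) (h : c ≠ '%') :
    pvCollect (c :: r) = pvCollect r := by
  rw [pvCollect.eq_def]; simp [h]

lemma pvCollect_pct_one : pvCollect ['%'] = [] := by rw [pvCollect.eq_def]; simp

lemma pvCollect_pct_at (r : List Char) : pvCollect ('%' :: '@' :: r) = "String" :: pvCollect r := by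
  rw [pvCollect.eq_def]; simp

lemma pvCollect_pct_d (r : List Char) : pvCollect ('%' :: 'd' :: r) = "Int" :: pvCollect r := by
  rw [pvCollect.eq_def]; simp

lemma pvCollect_pct_other (c2 : Char) (r : List Char) (ha : c2 ≠ '@') (hd : c2 ≠ 'd') :
    pvCollect ('%' :: c2 :: r) = pvCollect (c2 :: r) := by
  rw [pvCollect.eq_def]; simp [ha, hd]

lemma pvBstep_false (params : List String) (c : Char) :
    pvBstep (false, params) c = ((c == '%'), params) := by
  simp [pvBstep]

lemma pvAloop_eq_collect : ∀ (n : Nat) (cs : List Char) (i : Nat), cs.length - i ≤ n →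
    ∀ params, pvAloop cs i params = params ++ pvCollect (cs.drop i) := by
  intro n
  induction n with
  | zero =>
    intro cs i hn params
    have h : ¬ i < cs.length := by omega
    rw [pvAloop, dif_neg h, List.drop_eq_nil_of_le (by omega), pvCollect_nil]
    simp
  | succ n ih =>
    intro cs i hn params
    by_cases h : i < cs.length
    · rw [List.drop_eq_getElem_cons h, pvAloop, dif_pos h]
      by_cases hp : cs[i] = '%'
      · rw [if_pos hp]
        by_cases h2 : i + 1 < cs.length
        · rw [dif_pos h2, List.drop_eq_getElem_cons h2]
          by_cases ha : cs[i+1] = '@'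
          · rw [if_pos ha, ih cs (i+2) (by omega), hp, ha, pvCollect_pct_at]
            simp
          · rw [if_neg ha]
            by_cases hd : cs[i+1] = 'd'
            · rw [if_pos hd, ih cs (i+2) (by omega), hp, hd, pvCollect_pct_d]
              simp
            · rw [if_neg hd, ih cs (i+1) (by omega), hp,
                  pvCollect_pct_other cs[i+1] (cs.drop (i+2)) ha hd,
                  ← List.drop_eq_getElem_cons h2]
        · rw [dif_neg h2, ih cs (i+1) (by omega), hp]
          have hnil : cs.drop (i+1) = [] := List.drop_eq_nil_of_le (by omega)
          rw [hnil, pvCollect_pct_one, pvCollect_nil]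
      · rw [if_neg hp, ih cs (i+1) (by omega), pvCollect_cons_ne cs[i] _ hp]
    · rw [pvAloop, dif_neg h, List.drop_eq_nil_of_le (by omega), pvCollect_nil]
      simp

lemma pvB_eq_collect : ∀ (n : Nat) (l : List Char), l.length ≤ n →
    ∀ params, (List.foldl pvBstep (false, params) l).2 = params ++ pvCollect l := by
  intro n
  induction n with
  | zero =>
    intro l hn params
    have : l = [] := List.eq_nil_of_length_eq_zero (by omega)
    rw [this]; simp [pvCollect_nil]
  | succ n ih =>
    intro l hn params
    match l with
    | [] => simp [pvCollect_nil]
    | c :: rest =>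
      by_cases hp : c = '%'
      · subst hp
        match rest with
        | [] =>
          simp [List.foldl, pvBstep_false, pvCollect_pct_one]
        | c2 :: rest2 =>
          simp only [List.foldl, pvBstep_false]
          by_cases ha : c2 = '@'
          · subst ha
            have : pvBstep (('%' == '%'), params) '@' = (false, params ++ ["String"]) := by
              simp [pvBstep]
            rw [this, ih rest2 (by simp at hn ⊢; omega), pvCollect_pct_at]
            simp
          · by_cases hd : c2 = 'd'
            · subst hd
              have : pvBstep (('%' == '%'), params) 'd' = (false, params ++ ["Int"]) := by
                simp [pvBstep]
              rw [this, ih rest2 (by simp at hn ⊢; omega), pvCollect_pct_d]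
              simp
            · have : pvBstep (('%' == '%'), params) c2 = ((c2 == '%'), params) := by
                simp [pvBstep, ha, hd]
              rw [this]
              have hstep : (List.foldl pvBstep ((c2 == '%'), params) rest2).2
                  = (List.foldl pvBstep (false, params) (c2 :: rest2)).2 := by
                simp [List.foldl, pvBstep_false]
              rw [hstep, ih (c2 :: rest2) (by simp at hn ⊢; omega),
                  pvCollect_pct_other c2 rest2 ha hd]
      · simp only [List.foldl]
        rw [pvBstep_false]
        have : (c == '%') = false := by simp [hp]
        rw [this, ih rest (by simp at hn ⊢; omega), pvCollect_cons_ne c rest hp]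

-- ===== VERDICT (by name: the statement is the Claim_ definition above) =====
theorem extract_substitution_parameters_spec : Claim_equal_extract_substitution_parameters := by
  intro value _
  unfold Spec_extract_substitution_parameters extract_substitution_parameters extract_substitution_parameters_alt
  by_cases h : value = ""
  · subst h
    simp [PySem.Str.join, PySem.Chars.join, List.intercalate]
  · rw [if_neg h, pvAloop_eq_collect value.toList.length value.toList 0 (by omega),
        pvB_eq_collect value.toList.length value.toList le_rfl]
    simp
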